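-- pv_equiv track=rewrite | github.com/KomacloS/complex_editor_project | src/complex_editor/ui/validators.py | validate_pins
-- ===== SOURCE A (Python) =====
-- from typing import Iterable, Sequence, Tuple
--
-- def validate_pins(pins: Iterable[int], max_pin: int) -> Tuple[bool, str]:
--     """Validate *pins* against range and duplicate rules.
--
--     Parameters
--     ----------
--     pins:
--         Iterable of pin numbers; ``None`` values are ignored.
--     max_pin:
--         Highest allowed pin number.
--     Returns
--     -------
--     tuple
--         ``(is_valid, message)`` where ``message`` describes the first error.
--     """
--
--     numbers = [p for p in pins if p is not None]
--     for p in numbers: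
--         if p < 1 or p > max_pin:
--             return False, f"pin {p} out of range"
--     if len(numbers) != len(set(numbers)):
--         return False, "duplicate pins"
--     return True, ""
-- ===== SOURCE B (Python) =====
-- def validate_pins(pins, max_pin):
--     numbers = [p for p in pins if p is not None]
--     bad = next((p for p in numbers if p < 1 or p > max_pin), None)
--     if bad is not None:
--         return False, f"pin {bad} out of range"
--     s = sorted(numbers)
--     if any(x == y for x, y in zip(s, s[1:])):
--         return False, "duplicate pins"
--     return True, ""
-- ===== Notes on version B (the rewrite author's own statement) =====
-- stated objective: alternative
-- what changed: The range scan becomes a declarative first-match search (next over a generator) and duplicate detection is done by sorting a copy and testing adjacent pairs with any/zip instead of comparing the list length with the size of a hash set.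
import Mathlib
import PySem

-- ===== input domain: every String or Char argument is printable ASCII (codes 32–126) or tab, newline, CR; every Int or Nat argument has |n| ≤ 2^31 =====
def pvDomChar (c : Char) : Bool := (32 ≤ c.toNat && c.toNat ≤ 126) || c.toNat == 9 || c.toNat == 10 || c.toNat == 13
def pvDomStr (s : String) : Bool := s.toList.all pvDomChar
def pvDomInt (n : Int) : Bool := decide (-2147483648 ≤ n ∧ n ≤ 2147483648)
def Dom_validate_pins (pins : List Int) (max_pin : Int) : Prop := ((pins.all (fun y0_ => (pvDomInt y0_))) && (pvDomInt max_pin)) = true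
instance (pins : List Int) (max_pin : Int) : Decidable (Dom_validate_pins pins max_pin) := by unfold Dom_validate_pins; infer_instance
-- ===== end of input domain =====

-- B replaces A's explicit range loop by a first-match search and A's set-size duplicate check by sort-then-adjacent-pairs: an alternative strategy, not faster.

-- ===== PORT A =====
-- the range scan: returns the first pin with p < 1 or p > max_pin (Python's early return)
def vpA_scan (max_pin : Int) : List Int → Option Int
  | [] => none
  | p :: rest => if p < 1 ∨ p > max_pin then some p else vpA_scan max_pin rest

def validate_pins (pins : List Int) (max_pin : Int) : Bool × String :=
  -- numbers = [p for p in pins if p is not None]: identity here (elements are Int, never None)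
  let numbers := pins
  match vpA_scan max_pin numbers with
  | some p => (false, "pin " ++ PySem.Int.toStr p ++ " out of range")
  | none =>
    if PySem.List.len numbers ≠ PySem.Set.len (PySem.Set.ofList numbers) then (false, "duplicate pins")
    else (true, "")

-- ===== PORT B =====
def validate_pins_alt (pins : List Int) (max_pin : Int) : Bool × String :=
  let numbers := pins
  -- bad = next((p for p in numbers if p < 1 or p > max_pin), None)
  match numbers.find? (fun p => decide (p < 1) || decide (p > max_pin)) with
  | some bad => (false, "pin " ++ PySem.Int.toStr bad ++ " out of range")
  | none =>
    -- s = sorted(numbers); any(x == y for x, y in zip(s, s[1:]))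
    let s := PySem.List.sorted numbers (fun x => x) false
    if (s.zip (PySem.List.slice s (some 1) none)).any (fun q => q.1 == q.2) then (false, "duplicate pins")
    else (true, "")

-- ===== PRECONDITION & SPEC =====
def Spec_validate_pins (pins : List Int) (max_pin : Int) (out : Bool × String) : Prop := out = validate_pins_alt pins max_pin
instance (pins : List Int) (max_pin : Int) (out : Bool × String) : Decidable (Spec_validate_pins pins max_pin out) := by unfold Spec_validate_pins; infer_instance

-- ===== CLAIM (what is proved, stated in full; the proofs are below) =====
def Claim_equal_validate_pins : Prop := ∀ (pins : List Int) (max_pin : Int), Dom_validate_pins pins max_pin → Spec_validate_pins pins max_pin (validate_pins pins max_pin)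

-- ===== LEMMAS AND PROOFS =====
theorem vp_scan_eq (max_pin : Int) (xs : List Int) :
    vpA_scan max_pin xs = xs.find? (fun p => decide (p < 1) || decide (p > max_pin)) := by
  induction xs with
  | nil => rfl
  | cons p rest ih =>
    rw [vpA_scan, List.find?_cons, ih]
    by_cases h1 : p < 1
    · simp [h1]
    · by_cases h2 : p > max_pin <;> simp [h1, h2]

-- A's set-size test detects exactly non-Nodup lists
theorem vpA_dup_iff (xs : List Int) :
    (PySem.Set.ofList xs).length = xs.length ↔ xs.Nodup := by
  have hperm : (PySem.Set.ofList xs).Perm xs.dedup := by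
    rw [List.perm_ext_iff_of_nodup (PySem.Set.nodup_ofList xs) xs.nodup_dedup]
    intro a
    rw [PySem.Set.mem_ofList, List.mem_dedup]
  have hlen : (PySem.Set.ofList xs).length = xs.dedup.length := hperm.length_eq
  rw [hlen]
  constructor
  · intro h
    have := (xs.dedup_sublist).eq_of_length h
    exact List.dedup_eq_self.mp this
  · intro h
    rw [List.dedup_eq_self.mpr h]

-- adjacent-pair any on a ≤-sorted list detects exactly non-Nodup lists
theorem vpB_zip_iff (s : List Int) (hs : s.Pairwise (· ≤ ·)) :
    ((s.zip s.tail).any (fun q => q.1 == q.2) = false) ↔ s.Nodup := by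
  induction s with
  | nil => simp
  | cons a t ih =>
    cases t with
    | nil => simp
    | cons b u =>
      have hab : a ≤ b := (List.pairwise_cons.mp hs).1 b (by simp)
      have hbu : ∀ x ∈ u, b ≤ x := fun x hx =>
        (List.pairwise_cons.mp (List.pairwise_cons.mp hs).2).1 x hx
      have ih' := ih (List.pairwise_cons.mp hs).2
      simp only [List.tail_cons, List.zip_cons_cons, List.any_cons, Bool.or_eq_false_iff,
        beq_eq_false_iff_ne] at ih' ⊢
      rw [ih']
      constructor
      · rintro ⟨hne, hnd⟩
        refine List.nodup_cons.mpr ⟨?_, hnd⟩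
        intro hmem
        rcases List.mem_cons.mp hmem with h | h
        · exact hne h
        · have h1 : a < b := lt_of_le_of_ne hab hne
          have : a < a := lt_of_lt_of_le h1 (hbu a h)
          omega
      · intro hnd
        have h1 := List.nodup_cons.mp hnd
        exact ⟨fun h => h1.1 (h ▸ List.mem_cons_self), h1.2⟩

theorem validate_pins_spec : Claim_equal_validate_pins := by
  intro pins max_pin _
  unfold Spec_validate_pins validate_pins validate_pins_alt
  simp only []
  rw [← vp_scan_eq]
  cases vpA_scan max_pin pins with
  | some p => rfl
  | none =>
    simp only
    have hA : (PySem.List.len pins ≠ PySem.Set.len (PySem.Set.ofList pins)) ↔ ¬ pins.Nodup := by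
      rw [PySem.List.len_eq, PySem.Set.len]
      constructor
      · intro h hnd
        exact h (by exact_mod_cast ((vpA_dup_iff pins).mpr hnd).symm)
      · intro h hlen
        exact h ((vpA_dup_iff pins).mp (by exact_mod_cast hlen.symm))
    have hsortperm := PySem.List.sorted_perm pins (fun x => x) false
    set s := PySem.List.sorted pins (fun x => x) false with hsdef
    have hB : ((s.zip (PySem.List.slice s (some 1) none)).any (fun q => q.1 == q.2) = true) ↔ ¬ pins.Nodup := by
      have hpw : s.Pairwise (· ≤ ·) := by
        have := PySem.List.sorted_pairwise pins (fun x => x)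
        simpa using this
      rw [PySem.List.slice_from_one, ← Bool.not_eq_false, not_iff_not.symm, not_not, vpB_zip_iff s hpw]
      exact hsortperm.nodup_iff.trans not_not.symm
    split_ifs with h1 h2 h2
    · rfl
    · exact absurd (hA.mp h1) (by rw [← hB]; simpa using h2)
    · exact absurd (hB.mp h2) (by rw [← hA]; exact h1)
    · rfl
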